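-- pv_equiv track=rewrite | github.com/ahmet40/projet_python1 | sae1_Python_2022/explore_dnb.py | liste_sessions
-- ===== SOURCE A (Python) =====
-- def tri_selection(liste):
--     """trier la liste données en paramétre par ordre croissant
--     args:
--         liste(liste): une liste d'années
--     returns:
--         liste: une liste trié dans l'ordre croissant
--     """
--     for i in range(len(liste)):
--         indice_mini=i
--         mini=liste[i]
--         for j in range(i+1,len(liste)):
--             if liste[j] < mini:
--                 indice_mini=j
--                 mini=liste[j]
--         if indice_mini != i:
--             temp=liste[i]
--             liste[i]=liste[indice_mini]
--             liste[indice_mini]=temp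
--     return liste
--
-- def liste_sessions(liste_resultats):
--     """retourne la liste des sessions (années) dont au moins un résultat est reporté dans la liste de résultats.
--     ATTENTION : la liste renvoyée doit être sans doublons et triée par ordre chronologique des sessions
--
--     Args:
--         liste_resultats (list): une liste de résultats
--
--     Returns:
--         list: une liste de session (int) triée (ete) sans doublons
--     """
--     if liste_resultats!=[]:
--         liste_renvoye=[]
--         for element in liste_resultats:
--             if element[0] not in liste_renvoye :
--                 liste_renvoye.append(element[0])
--
--         tri_selection(liste_renvoye)
--         return liste_renvoye
--     return []
-- ===== SOURCE B (Python) =====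
-- def liste_sessions(liste_resultats):
--     """retourne la liste triee sans doublons des sessions (premiers elements)."""
--     ordonnee = sorted(e[0] for e in liste_resultats)
--     resultat = []
--     for v in ordonnee:
--         if not resultat or resultat[-1] != v:
--             resultat.append(v)
--     return resultat
-- ===== Notes on version B (the rewrite author's own statement) =====
-- stated objective: simpler
-- what changed: A dedups first-elements with a membership scan over the growing result and then selection-sorts it; B sorts all first-elements once and removes duplicates in one adjacent-comparison pass.
import Mathlib
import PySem

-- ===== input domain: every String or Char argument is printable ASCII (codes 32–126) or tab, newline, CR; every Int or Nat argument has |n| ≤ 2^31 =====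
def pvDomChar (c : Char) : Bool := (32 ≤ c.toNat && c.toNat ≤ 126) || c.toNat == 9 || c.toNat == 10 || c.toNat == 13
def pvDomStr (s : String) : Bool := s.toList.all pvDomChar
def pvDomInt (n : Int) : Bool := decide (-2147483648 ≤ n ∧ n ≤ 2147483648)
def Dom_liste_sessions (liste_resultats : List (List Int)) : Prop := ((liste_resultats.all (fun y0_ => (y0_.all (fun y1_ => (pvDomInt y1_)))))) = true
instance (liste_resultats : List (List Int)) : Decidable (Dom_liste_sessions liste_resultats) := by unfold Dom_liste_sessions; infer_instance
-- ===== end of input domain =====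

-- B sorts all first-elements once and removes duplicates in a single adjacent-comparison
-- pass, replacing A's membership-scan dedup followed by a selection sort.


-- ===== PORT A =====
-- inner loop of tri_selection: scan j = i+1 … len-1 keeping (indice_mini, mini);
-- all indices are in [0, len), so `getD _ 0` is exact Python indexing here.
def triInner (l : List Int) (i : Nat) : Nat × Int :=
  (List.range' (i+1) (l.length - (i+1))).foldl
    (fun p j => if l.getD j 0 < p.2 then (j, l.getD j 0) else p)
    (i, l.getD i 0)

-- body of the outer `for i in range(len(liste))` loop: find min index, then swap
def triStep (l : List Int) (i : Nat) : List Int :=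
  let p := triInner l i
  if p.1 ≠ i then
    let temp := l.getD i 0
    (l.set i (l.getD p.1 0)).set p.1 temp
  else l

def tri_selection (liste : List Int) : List Int :=
  (List.range liste.length).foldl triStep liste

def liste_sessions (liste_resultats : List (List Int)) : List Int :=
  if liste_resultats ≠ [] then
    -- element[0] raises on an empty element: excluded by Pre_; inside Pre_ `.getD 0` is exact
    let liste_renvoye := liste_resultats.foldl
      (fun r element =>
        if (PySem.List.pyGet? element 0).getD 0 ∉ r
        then r ++ [(PySem.List.pyGet? element 0).getD 0] else r) []
    tri_selection liste_renvoye
  else []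

-- ===== PORT B =====
def liste_sessions_alt (liste_resultats : List (List Int)) : List Int :=
  let ordonnee := PySem.List.sorted
    (liste_resultats.map (fun e => (PySem.List.pyGet? e 0).getD 0)) (fun x => x) false
  ordonnee.foldl
    (fun resultat v =>
      if resultat.isEmpty || (PySem.List.pyGet? resultat (-1)) ≠ some v
      then resultat ++ [v] else resultat) []

-- ===== PRECONDITION & SPEC =====
-- Pre_ excludes exactly the inputs containing an empty inner list, on which
-- Python A raises IndexError at element[0] (B raises there too).
def Pre_liste_sessions (liste_resultats : List (List Int)) : Prop :=
  ∀ e ∈ liste_resultats, e ≠ []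
instance (liste_resultats : List (List Int)) : Decidable (Pre_liste_sessions liste_resultats) := by unfold Pre_liste_sessions; infer_instance

def pvWitness_liste_sessions : List (List Int) := [[2020, 1], [2019], [2020, 5]]

def Spec_liste_sessions (liste_resultats : List (List Int)) (out : List Int) : Prop := out = liste_sessions_alt liste_resultats
instance (liste_resultats : List (List Int)) (out : List Int) : Decidable (Spec_liste_sessions liste_resultats out) := by unfold Spec_liste_sessions; infer_instance

-- ===== CLAIM (what is proved, stated in full; the proofs are below) =====
def Claim_equal_liste_sessions : Prop := ∀ (liste_resultats : List (List Int)), Dom_liste_sessions liste_resultats → Pre_liste_sessions liste_resultats → Spec_liste_sessions liste_resultats (liste_sessions liste_resultats)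

-- ===== LEMMAS AND PROOFS =====

-- two strictly increasing lists with the same members are equal
theorem strict_sorted_unique (l₁ l₂ : List Int) (h₁ : l₁.Pairwise (· < ·))
    (h₂ : l₂.Pairwise (· < ·)) (hm : ∀ a, a ∈ l₁ ↔ a ∈ l₂) : l₁ = l₂ := by
  have n₁ : l₁.Nodup := h₁.imp (fun h => ne_of_lt h)
  have n₂ : l₂.Nodup := h₂.imp (fun h => ne_of_lt h)
  exact ((List.perm_ext_iff_of_nodup n₁ n₂).mpr hm).eq_of_pairwise
    (fun a b _ _ h1 h2 => absurd h1 (asymm h2)) h₁ h₂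

-- A's dedup loop: the accumulated list stays duplicate-free and collects the heads
theorem dedup_inv (xs : List (List Int)) (acc : List Int) (hacc : acc.Nodup) :
    (xs.foldl (fun r element =>
        if (PySem.List.pyGet? element 0).getD 0 ∉ r
        then r ++ [(PySem.List.pyGet? element 0).getD 0] else r) acc).Nodup ∧
    ∀ y, (y ∈ xs.foldl (fun r element =>
        if (PySem.List.pyGet? element 0).getD 0 ∉ r
        then r ++ [(PySem.List.pyGet? element 0).getD 0] else r) acc ↔
      y ∈ acc ∨ y ∈ xs.map (fun e => (PySem.List.pyGet? e 0).getD 0)) := by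
  induction xs generalizing acc with
  | nil => simpa using hacc
  | cons e t ih =>
    simp only [List.foldl_cons, List.map_cons, List.mem_cons]
    by_cases hmem : (PySem.List.pyGet? e 0).getD 0 ∈ acc
    · rw [if_neg (not_not_intro hmem)]
      rcases ih acc hacc with ⟨h1, h2⟩
      refine ⟨h1, fun y => ?_⟩
      rw [h2 y]
      constructor
      · rintro (hy | hy)
        · exact Or.inl hy
        · exact Or.inr (Or.inr hy)
      · rintro (hy | hy | hy)
        · exact Or.inl hy
        · exact Or.inl (hy ▸ hmem)
        · exact Or.inr hy
    · rw [if_pos hmem]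
      have hacc' : (acc ++ [(PySem.List.pyGet? e 0).getD 0]).Nodup := by
        simp only [List.nodup_append, List.nodup_singleton, List.mem_singleton]
        refine ⟨hacc, trivial, fun a ha b hb he => hmem ?_⟩
        rw [← hb, ← he]; exact ha
      rcases ih (acc ++ [(PySem.List.pyGet? e 0).getD 0]) hacc' with ⟨h1, h2⟩
      refine ⟨h1, fun y => ?_⟩
      rw [h2 y]
      simp only [List.mem_append, List.mem_singleton]
      tauto

-- the inner scan returns an index m ∈ [i, s+c) with value l[m] minimal on [i, s+c)
theorem inner_fold_spec (l : List Int) (i : Nat) :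
    ∀ (c s : Nat) (p : Nat × Int), i ≤ p.1 → p.1 < s → p.2 = l.getD p.1 0 →
    (∀ j, i ≤ j → j < s → p.2 ≤ l.getD j 0) →
    let q := (List.range' s c).foldl
      (fun p j => if l.getD j 0 < p.2 then (j, l.getD j 0) else p) p
    i ≤ q.1 ∧ q.1 < s + c ∧ q.2 = l.getD q.1 0 ∧
      ∀ j, i ≤ j → j < s + c → q.2 ≤ l.getD j 0 := by
  intro c
  induction c with
  | zero =>
    intro s p h1 h2 h3 h4
    exact ⟨h1, by simpa using h2, h3, by simpa using h4⟩
  | succ c ih =>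
    intro s p h1 h2 h3 h4
    rw [List.range'_succ, List.foldl_cons]
    have key := ih (s+1) (if l.getD s 0 < p.2 then (s, l.getD s 0) else p) ?_ ?_ ?_ ?_
    · refine ⟨key.1, by omega, key.2.2.1, fun j hj1 hj2 => key.2.2.2 j hj1 (by omega)⟩
    · split_ifs with hc
      · omega
      · exact h1
    · split_ifs with hc
      · omega
      · omega
    · split_ifs with hc
      · rfl
      · exact h3
    · intro j hj1 hj2
      split_ifs with hc
      · rcases Nat.lt_succ_iff_lt_or_eq.mp hj2 with hj | hj
        · exact le_of_lt (lt_of_lt_of_le hc (h4 j hj1 hj))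
        · subst hj; rfl
      · rcases Nat.lt_succ_iff_lt_or_eq.mp hj2 with hj | hj
        · exact h4 j hj1 hj
        · subst hj; exact le_of_not_gt hc

theorem triInner_spec (l : List Int) (i : Nat) (hi : i < l.length) :
    i ≤ (triInner l i).1 ∧ (triInner l i).1 < l.length ∧
    (triInner l i).2 = l.getD (triInner l i).1 0 ∧
    ∀ j, i ≤ j → j < l.length → (triInner l i).2 ≤ l.getD j 0 := by
  have key := inner_fold_spec l i (l.length - (i+1)) (i+1) (i, l.getD i 0)
    (le_refl i) (Nat.lt_succ_self i) rfl
    (fun j hj1 hj2 => by have : j = i := by omega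
                         simp [this])
  have hlen : i + 1 + (l.length - (i+1)) = l.length := by omega
  rw [hlen] at key
  simpa [triInner] using key

-- swapping an inner element with the head is a permutation
theorem cons_get_set_perm {α : Type} (t : List α) (m : Nat) (hm : m < t.length) (x : α) :
    (t[m] :: t.set m x).Perm (x :: t) := by
  induction t generalizing m with
  | nil => simp at hm
  | cons y t ih =>
    cases m with
    | zero => simpa using List.Perm.swap x y t
    | succ m =>
      have hm' : m < t.length := by simpa using hm
      simp only [List.getElem_cons_succ, List.set_cons_succ]
      exact ((List.Perm.swap _ _ _).trans (((ih m hm').cons y).trans (List.Perm.swap _ _ _)))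

-- a double set realising a swap is a permutation
theorem set_set_perm {α : Type} (l : List α) (i j : Nat) (hi : i < l.length) (hj : j < l.length) :
    ((l.set i l[j]).set j l[i]).Perm l := by
  induction l generalizing i j with
  | nil => simp at hi
  | cons x t ih =>
    cases i with
    | zero =>
      cases j with
      | zero => simp
      | succ m =>
        have hm : m < t.length := by simpa using hj
        simp only [List.getElem_cons_succ, List.getElem_cons_zero, List.set_cons_zero,
          List.set_cons_succ]
        exact cons_get_set_perm t m hm x
    | succ s =>
      cases j with
      | zero =>
        have hs : s < t.length := by simpa using hi
        simp only [List.getElem_cons_succ, List.getElem_cons_zero, List.set_cons_zero,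
          List.set_cons_succ]
        exact cons_get_set_perm t s hs x
      | succ m =>
        have hs : s < t.length := by simpa using hi
        have hm : m < t.length := by simpa using hj
        simp only [List.getElem_cons_succ, List.set_cons_succ]
        exact (ih s m hs hm).cons x

-- invariant of the selection-sort outer loop: positions below k are in final sorted position
def TriInv (l₀ : List Int) (k : Nat) (l' : List Int) : Prop :=
  l'.length = l₀.length ∧ l'.Perm l₀ ∧
  ∀ a b : Nat, a < b → b < l₀.length → a < k → l'.getD a 0 ≤ l'.getD b 0

theorem triStep_inv (l₀ : List Int) (k : Nat) (l' : List Int)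
    (hk : k < l₀.length) (h : TriInv l₀ k l') : TriInv l₀ (k+1) (triStep l' k) := by
  obtain ⟨hlen, hperm, hsort⟩ := h
  have hk' : k < l'.length := by omega
  obtain ⟨hm1, hm2, hmv, hmin⟩ := triInner_spec l' k hk'
  unfold triStep
  by_cases hcase : (triInner l' k).1 ≠ k
  · simp only [if_pos hcase]
    set m := (triInner l' k).1 with hmdef
    have hgm : l'.getD m 0 = l'[m] := List.getD_eq_getElem l' 0 hm2
    have hgk : l'.getD k 0 = l'[k] := List.getD_eq_getElem l' 0 hk'
    set r := (l'.set k (l'.getD m 0)).set m (l'.getD k 0) with hrdef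
    have hrlen : r.length = l₀.length := by simp [hrdef, hlen]
    have hrperm : r.Perm l₀ := by
      rw [hrdef, hgm, hgk]
      exact (set_set_perm l' k m hk' hm2).trans hperm
    have hr : ∀ p, p < l'.length →
        r.getD p 0 = if p = m then l'.getD k 0 else if p = k then l'.getD m 0 else l'.getD p 0 := by
      intro p hp
      have hp' : p < ((l'.set k (l'.getD m 0)).set m (l'.getD k 0)).length := by simpa using hp
      rw [hrdef, List.getD_eq_getElem _ 0 hp', List.getElem_set, List.getElem_set]
      by_cases h1 : p = m
      · simp [h1]
      · by_cases h2 : p = k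
        · simp [h2, hcase, Ne.symm hcase, List.getElem?_eq_getElem hm2]
        · simp [h1, h2, Ne.symm h1, Ne.symm h2, List.getElem?_eq_getElem hp]
    refine ⟨hrlen, hrperm, ?_⟩
    intro a b hab hb hak
    have hbl : b < l'.length := by omega
    have hal : a < l'.length := by omega
    rw [hr a hal, hr b hbl]
    have hmk : k ≤ m := hm1
    by_cases hak' : a < k
    · have ham : a ≠ m := by omega
      have hak2 : a ≠ k := by omega
      rw [if_neg ham, if_neg hak2]
      by_cases hbm : b = m
      · rw [if_pos hbm]
        exact hsort a k (by omega) (by omega) hak'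
      · rw [if_neg hbm]
        by_cases hbk : b = k
        · rw [if_pos hbk]
          exact hsort a m (by omega) (by omega) hak'
        · rw [if_neg hbk]
          exact hsort a b hab hb hak'
    · have hael : a = k := by omega
      subst hael
      have ham : a ≠ m := Ne.symm (by simpa using hcase)
      rw [if_neg ham, if_pos rfl]
      have hbk : b ≠ a := by omega
      by_cases hbm : b = m
      · rw [if_pos hbm]
        calc l'.getD m 0 = (triInner l' a).2 := hmv.symm
          _ ≤ l'.getD a 0 := hmin a (le_refl a) hk'
      · rw [if_neg hbm, if_neg hbk]
        calc l'.getD m 0 = (triInner l' a).2 := hmv.symm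
          _ ≤ l'.getD b 0 := hmin b (by omega) hbl
  · simp only [if_neg hcase]
    have hmk : (triInner l' k).1 = k := by omega
    refine ⟨hlen, hperm, ?_⟩
    intro a b hab hb hak
    by_cases hak' : a < k
    · exact hsort a b hab hb hak'
    · have hael : a = k := by omega
      subst hael
      calc l'.getD a 0 = (triInner l' a).2 := by rw [hmv, hmk]
        _ ≤ l'.getD b 0 := hmin b (by omega) (by omega)

theorem tri_fold_inv (l : List Int) :
    ∀ (c k : Nat) (l' : List Int), k + c = l.length → TriInv l k l' →
    TriInv l l.length ((List.range' k c).foldl triStep l') := by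
  intro c
  induction c with
  | zero =>
    intro k l' hkc h
    simpa [← hkc] using h
  | succ c ih =>
    intro k l' hkc h
    rw [List.range'_succ, List.foldl_cons]
    exact ih (k+1) (triStep l' k) (by omega) (triStep_inv l k l' (by omega) h)

theorem tri_selection_spec (l : List Int) :
    (tri_selection l).Perm l ∧ (tri_selection l).Pairwise (· ≤ ·) := by
  have base : TriInv l 0 l := ⟨rfl, List.Perm.refl l, fun a b _ _ h => absurd h (Nat.not_lt_zero a)⟩
  have key := tri_fold_inv l l.length 0 l (by omega) base
  rw [← List.range_eq_range'] at key
  obtain ⟨hlen, hperm, hsort⟩ := key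
  have hlen' : (tri_selection l).length = l.length := hlen
  have hperm' : (tri_selection l).Perm l := hperm
  have hsort' : ∀ a b : Nat, a < b → b < l.length → a < l.length →
      (tri_selection l).getD a 0 ≤ (tri_selection l).getD b 0 := hsort
  refine ⟨hperm', ?_⟩
  rw [List.pairwise_iff_getElem]
  intro i j hi hj hij
  have := hsort' i j hij (by omega) (by omega)
  rwa [List.getD_eq_getElem _ 0 hi, List.getD_eq_getElem _ 0 hj] at this

-- in a strictly increasing list every member is ≤ the last element
theorem mem_le_getLast (acc : List Int) (h : acc.Pairwise (· < ·)) :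
    ∀ a ∈ acc, ∀ lst, acc.getLast? = some lst → a ≤ lst := by
  induction acc with
  | nil => simp
  | cons x t ih =>
    intro a ha lst hlst
    rcases List.mem_cons.mp ha with rfl | hat
    · cases t with
      | nil => simp at hlst; omega
      | cons y u =>
        rw [List.getLast?_cons_cons] at hlst
        have hmem := List.mem_of_getLast? hlst
        exact le_of_lt ((List.pairwise_cons.mp h).1 lst hmem)
    · cases t with
      | nil => simp at hat
      | cons y u =>
        rw [List.getLast?_cons_cons] at hlst
        exact ih (List.pairwise_cons.mp h).2 a hat lst hlst

-- B's adjacent-dedup pass over a (≤)-sorted list: strictly increasing, same members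
theorem adj_inv (xs : List Int) : ∀ (acc : List Int), xs.Pairwise (· ≤ ·) →
    acc.Pairwise (· < ·) →
    (∀ lst ∈ acc.getLast?, ∀ x ∈ xs, lst ≤ x) →
    (xs.foldl (fun resultat v =>
      if resultat.isEmpty || (PySem.List.pyGet? resultat (-1)) ≠ some v
      then resultat ++ [v] else resultat) acc).Pairwise (· < ·) ∧
    ∀ y, (y ∈ xs.foldl (fun resultat v =>
      if resultat.isEmpty || (PySem.List.pyGet? resultat (-1)) ≠ some v
      then resultat ++ [v] else resultat) acc ↔ y ∈ acc ∨ y ∈ xs) := by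
  induction xs with
  | nil => intro acc _ hacc _; exact ⟨hacc, by simp⟩
  | cons v t ih =>
    intro acc hxs hacc hlink
    obtain ⟨hv, ht⟩ := List.pairwise_cons.mp hxs
    simp only [List.foldl_cons]
    by_cases hnil : acc = []
    · subst hnil
      simp only [List.isEmpty_nil, Bool.true_or, if_pos, List.nil_append]
      have key := ih [v] ht (by simp) (by simp; exact hv)
      refine ⟨key.1, fun y => ?_⟩
      rw [key.2 y]
      simp only [List.not_mem_nil, List.mem_cons]
      tauto
    · obtain ⟨lst, hlst⟩ := Option.isSome_iff_exists.mp (List.getLast?_isSome.mpr hnil)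
      have hlstmem : lst ∈ acc := List.mem_of_getLast? hlst
      have hlstv : lst ≤ v := hlink lst (by simp [hlst]) v (List.mem_cons_self)
      by_cases heq : lst = v
      · rw [if_neg (by simp [hnil, PySem.List.pyGet?_neg_one, hlst, heq])]
        have key := ih acc ht hacc
          (fun l hl x hx => hlink l hl x (List.mem_cons_of_mem v hx))
        refine ⟨key.1, fun y => ?_⟩
        rw [key.2 y]
        simp only [List.mem_cons]
        constructor
        · tauto
        · rintro (hy | hy | hy)
          · exact Or.inl hy
          · exact Or.inl (hy ▸ heq ▸ hlstmem)
          · exact Or.inr hy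
      · have hlt : lst < v := lt_of_le_of_ne hlstv heq
        rw [if_pos (by simp [PySem.List.pyGet?_neg_one, hlst, heq])]
        have hacc' : (acc ++ [v]).Pairwise (· < ·) := by
          rw [List.pairwise_append]
          refine ⟨hacc, by simp, fun a ha b hb => ?_⟩
          rw [List.mem_singleton.mp hb]
          exact lt_of_le_of_lt (mem_le_getLast acc hacc a ha lst hlst) hlt
        have hlink' : ∀ l ∈ (acc ++ [v]).getLast?, ∀ x ∈ t, l ≤ x := by
          intro l hl x hx
          rw [List.getLast?_concat] at hl
          simp only [Option.mem_def, Option.some_inj] at hl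
          exact hl ▸ hv x hx
        have key := ih (acc ++ [v]) ht hacc' hlink'
        refine ⟨key.1, fun y => ?_⟩
        rw [key.2 y]
        simp only [List.mem_append, List.mem_cons]
        tauto

-- ===== VERDICT (by name: the statement is the Claim_ definition above) =====
theorem liste_sessions_spec : Claim_equal_liste_sessions := by
  intro lr _ _
  unfold Spec_liste_sessions
  by_cases hnil : lr = []
  · subst hnil; rfl
  · have hA : liste_sessions lr = tri_selection (lr.foldl
        (fun r element =>
          if (PySem.List.pyGet? element 0).getD 0 ∉ r
          then r ++ [(PySem.List.pyGet? element 0).getD 0] else r) []) := by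
      simp [liste_sessions, hnil]
    have hded := dedup_inv lr [] List.nodup_nil
    set ded := lr.foldl
        (fun r element =>
          if (PySem.List.pyGet? element 0).getD 0 ∉ r
          then r ++ [(PySem.List.pyGet? element 0).getD 0] else r) [] with hdeddef
    have hts := tri_selection_spec ded
    have hnodupA : (tri_selection ded).Nodup := hts.1.nodup_iff.mpr hded.1
    have hstrictA : (tri_selection ded).Pairwise (· < ·) :=
      (hts.2.and hnodupA).imp (fun h => lt_of_le_of_ne h.1 h.2)
    have hmemA : ∀ y, y ∈ tri_selection ded ↔
        y ∈ lr.map (fun e => (PySem.List.pyGet? e 0).getD 0) := by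
      intro y
      rw [hts.1.mem_iff, hded.2 y]
      simp
    set ys := PySem.List.sorted
      (lr.map (fun e => (PySem.List.pyGet? e 0).getD 0)) (fun x => x) false with hysdef
    have hB : liste_sessions_alt lr = ys.foldl
        (fun resultat v =>
          if resultat.isEmpty || (PySem.List.pyGet? resultat (-1)) ≠ some v
          then resultat ++ [v] else resultat) [] := rfl
    have hsorted : ys.Pairwise (· ≤ ·) := by
      simpa using PySem.List.sorted_pairwise
        (lr.map (fun e => (PySem.List.pyGet? e 0).getD 0)) (fun x => x)
    have key := adj_inv ys [] hsorted List.Pairwise.nil (by simp)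
    have hmemB : ∀ y, y ∈ ys.foldl
        (fun resultat v =>
          if resultat.isEmpty || (PySem.List.pyGet? resultat (-1)) ≠ some v
          then resultat ++ [v] else resultat) [] ↔
        y ∈ lr.map (fun e => (PySem.List.pyGet? e 0).getD 0) := by
      intro y
      rw [key.2 y, hysdef]
      simp [PySem.List.mem_sorted]
    rw [hA, hB]
    exact strict_sorted_unique _ _ hstrictA key.1
      (fun y => (hmemA y).trans (hmemB y).symm)
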